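-- pv_equiv track=rewrite | github.com/tkmtakada/KyoproContests | abc260/prob3.py | convertFromBlue
-- ===== SOURCE A (Python) =====
-- def convertFromBlue(N, Y):
--     if N == 1:
--         return
--     B = [0 for _ in range(N+1)]  # レベル0も含めている
--     R = [0 for _ in range(N+1)]
--     B[1] = Y**(N-1)
--     for i in range(1, N):
--         R[i] = Y**(N-1-i)
--     return R, B
-- ===== SOURCE B (Python) =====
-- def convertFromBlue(N, Y):
--     if N == 1:
--         return
--     pows = []
--     p = 1
--     for _ in range(N - 1):
--         pows.append(p)
--         p *= Y
--     R = [0] + list(reversed(pows)) + [0]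
--     B = [0, p] + [0] * (N - 1)
--     return R, B
-- ===== Notes on version B (the rewrite author's own statement) =====
-- stated objective: faster
-- what changed: Replaces the per-index full exponentiation Y**(N-1-i) with a single running product (one multiplication per step) and builds R and B by list concatenation instead of index assignment into preallocated zero arrays.
-- outside the precondition, e.g. on convertFromBlue(0, 2): A raises IndexError, B returns ([0, 0], [0, 1])
import Mathlib
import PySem

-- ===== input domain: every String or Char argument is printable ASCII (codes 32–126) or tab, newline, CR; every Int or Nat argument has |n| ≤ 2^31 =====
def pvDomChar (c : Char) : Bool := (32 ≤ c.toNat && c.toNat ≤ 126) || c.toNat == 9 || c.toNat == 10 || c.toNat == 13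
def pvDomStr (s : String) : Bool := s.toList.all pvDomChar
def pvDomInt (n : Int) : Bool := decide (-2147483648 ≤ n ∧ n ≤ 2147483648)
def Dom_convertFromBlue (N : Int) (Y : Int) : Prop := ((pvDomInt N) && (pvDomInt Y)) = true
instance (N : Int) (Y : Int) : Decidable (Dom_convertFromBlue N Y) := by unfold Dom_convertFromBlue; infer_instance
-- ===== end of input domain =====

-- B replaces the per-index exponentiation Y**(N-1-i) by a single running product (one multiply per step),
-- building the lists by concatenation instead of index assignment; measured faster (asymptotically fewer bignum multiplies).

-- ===== PORT A =====
def convertFromBlue (N : Int) (Y : Int) : Option (List Int × List Int) :=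
  if N = 1 then none
  else
    let B0 : List Int := (PySem.List.pyRange 0 (N + 1) 1).map (fun _ => 0)
    let R0 : List Int := (PySem.List.pyRange 0 (N + 1) 1).map (fun _ => 0)
    -- B[1] = Y**(N-1); under Pre_ (N ≥ 1, here N ≥ 2) the exponent is a nonnegative int, so '^ toNat' is exact
    let B := PySem.List.pySetD B0 1 (Y ^ (N - 1).toNat)
    -- for i in range(1, N): R[i] = Y**(N-1-i)   (exponent nonnegative for i < N under Pre_)
    let R := (PySem.List.pyRange 1 N 1).foldl (fun r i => PySem.List.pySetD r i (Y ^ (N - 1 - i).toNat)) R0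
    some (R, B)

-- ===== PORT B =====
def convertFromBlue_alt (N : Int) (Y : Int) : Option (List Int × List Int) :=
  if N = 1 then none
  else
    -- pows = []; p = 1; for _ in range(N-1): pows.append(p); p *= Y
    let s := (PySem.List.pyRange 0 (N - 1) 1).foldl
      (fun (s : List Int × Int) _ => (s.1 ++ [s.2], s.2 * Y)) (([] : List Int), (1 : Int))
    some (([0] ++ s.1.reverse ++ [0], [0, s.2] ++ PySem.List.pyRepeat [0] (N - 1)))

-- ===== PRECONDITION & SPEC =====
-- Pre_ excludes N ≤ 0, on which A raises IndexError at B[1] = Y**(N-1) (the zero-lists are too short).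
def Pre_convertFromBlue (N : Int) (Y : Int) : Prop := 1 ≤ N
instance (N : Int) (Y : Int) : Decidable (Pre_convertFromBlue N Y) := by unfold Pre_convertFromBlue; infer_instance
def pvWitness_convertFromBlue : Int × Int := (3, 2)

def Spec_convertFromBlue (N : Int) (Y : Int) (out : Option (List Int × List Int)) : Prop := out = convertFromBlue_alt N Y
instance (N : Int) (Y : Int) (out : Option (List Int × List Int)) : Decidable (Spec_convertFromBlue N Y out) := by unfold Spec_convertFromBlue; infer_instance

-- ===== CLAIM (what is proved, stated in full; the proofs are below) =====
def Claim_equal_convertFromBlue : Prop := ∀ (N : Int) (Y : Int), Dom_convertFromBlue N Y → Pre_convertFromBlue N Y → Spec_convertFromBlue N Y (convertFromBlue N Y)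

-- ===== LEMMAS AND PROOFS =====

-- a Python zero-list [0 for _ in range(m)] is a replicate
lemma pv_zeros (m : Int) : (PySem.List.pyRange 0 m 1).map (fun _ => (0 : Int)) = List.replicate m.toNat 0 := by
  simp [PySem.List.pyRange_one, Function.comp_def, List.map_const']

-- B's running-product loop: after n iterations, pows = [Y^0, …, Y^(n-1)] and p = Y^n
lemma pv_altfold (Y : Int) (n : Nat) :
    (PySem.List.pyRange 0 (n : Int) 1).foldl
      (fun (s : List Int × Int) _ => (s.1 ++ [s.2], s.2 * Y)) (([] : List Int), (1 : Int))
      = ((List.range n).map (fun k => Y ^ k), Y ^ n) := by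
  induction n with
  | zero => simp [PySem.List.pyRange_one_eq_nil]
  | succ m ih =>
    rw [show ((m + 1 : Nat) : Int) = (m : Int) + 1 by push_cast; ring,
        PySem.List.pyRange_one_succ_right (by exact_mod_cast Int.natCast_nonneg m)]
    rw [List.foldl_append, ih]
    simp [List.range_succ, pow_succ]

-- A's assignment loop 'for i in range(s, s+m): L[i] = f(i)' rewrites the window [s, s+m) of L to the values of f
lemma pv_setfold (f : Int → Int) :
    ∀ (m s : Nat) (L : List Int), s + m ≤ L.length →
    (PySem.List.pyRange (s : Int) ((s : Int) + (m : Int)) 1).foldl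
        (fun r i => PySem.List.pySetD r i (f i)) L
      = L.take s ++ ((List.range m).map (fun k => f (((s + k : Nat)) : Int))) ++ L.drop (s + m) := by
  intro m
  induction m with
  | zero =>
    intro s L h
    simp [PySem.List.pyRange_one_eq_nil]
  | succ m ih =>
    intro s L h
    rw [PySem.List.pyRange_one_cons (by push_cast; omega)]
    rw [List.foldl_cons]
    have hs : PySem.List.pySetD L (s : Int) (f s) = L.set s (f s) := by
      simp [PySem.List.pySetD_natCast]
    rw [hs]
    have hrange : (s : Int) + 1 = ((s + 1 : Nat) : Int) := by push_cast; ring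
    have hrange2 : (s : Int) + ((m + 1 : Nat) : Int) = ((s + 1 : Nat) : Int) + (m : Int) := by push_cast; ring
    rw [hrange, hrange2, ih (s + 1) (L.set s (f s)) (by simp; omega)]
    have hslen : s < L.length := by omega
    have htake : (L.set s (f s)).take (s + 1) = L.take s ++ [f s] := by
      rw [List.set_eq_take_append_cons_drop, if_pos hslen]
      rw [List.take_append]
      simp [List.length_take, Nat.min_eq_left (Nat.le_of_lt hslen), List.take_take]
    have hdrop : (L.set s (f s)).drop (s + 1 + m) = L.drop (s + 1 + m) := by
      rw [List.drop_set_of_lt (by omega)]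
    rw [htake, hdrop]
    have hmap : (List.range (m + 1)).map (fun k => f (((s + k : Nat)) : Int))
        = f s :: (List.range m).map (fun k => f ((((s + 1) + k : Nat)) : Int)) := by
      rw [List.range_succ_eq_map, List.map_cons, List.map_map]
      simp only [Nat.add_zero, List.cons.injEq, true_and]
      apply List.map_congr_left
      intro k _
      simp only [Function.comp]
      congr 1
      omega
    rw [hmap]
    simp [List.append_assoc]
    omega

-- reversing the ascending power list gives the descending one
lemma pv_rev_pows (Y : Int) (n : Nat) :
    ((List.range n).map (fun k => Y ^ k)).reverse = (List.range n).map (fun k => Y ^ (n - 1 - k)) := by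
  rw [← List.map_reverse, List.range_eq_range', List.reverse_range', List.map_map,
      ← List.range_eq_range']
  apply List.map_congr_left
  intro k hk
  simp [Function.comp]

-- ===== VERDICT (by name: the statement is the Claim_ definition above) =====
theorem convertFromBlue_spec : Claim_equal_convertFromBlue := by
  intro N Y _ hpre
  unfold Spec_convertFromBlue convertFromBlue convertFromBlue_alt
  by_cases h1 : N = 1
  · simp [h1]
  · simp only [if_neg h1]
    have hN2 : 2 ≤ N := by unfold Pre_convertFromBlue at hpre; omega
    set n : Nat := (N - 1).toNat with hn
    have hNn : N = (n : Int) + 1 := by omega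
    have hN1 : N - 1 = (n : Int) := by omega
    have hTop : (N + 1).toNat = n + 2 := by omega
    clear_value n
    -- B side loop
    rw [hN1, pv_altfold Y n]
    -- A side zero lists
    rw [pv_zeros, hTop]
    -- A side assignment loop
    have hr : PySem.List.pyRange 1 N 1
        = PySem.List.pyRange ((1 : Nat) : Int) (((1 : Nat) : Int) + (n : Int)) 1 := by
      congr 1; omega
    rw [hr, pv_setfold (fun i => Y ^ ((n : Int) - i).toNat) n 1 (List.replicate (n + 2) 0)
        (by simp [List.length_replicate]; omega)]
    -- simplify the three pieces
    have htake : (List.replicate (n + 2) (0 : Int)).take 1 = [0] := by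
      simp [List.take_replicate]
    have hdrop : (List.replicate (n + 2) (0 : Int)).drop (1 + n) = [0] := by
      rw [List.drop_replicate, show n + 2 - (1 + n) = 1 by omega]
      rfl
    rw [htake, hdrop]
    have hmap : (List.range n).map (fun k => Y ^ ((n : Int) - ((1 + k : Nat) : Int)).toNat)
        = (List.range n).map (fun k => Y ^ (n - 1 - k)) := by
      apply List.map_congr_left
      intro k hk
      have hk' : k < n := List.mem_range.mp hk
      congr 1
      omega
    rw [hmap, ← pv_rev_pows]
    -- the B vectors
    have hB : PySem.List.pySetD (List.replicate (n + 2) (0 : Int)) 1 (Y ^ n)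
        = [0, Y ^ n] ++ PySem.List.pyRepeat [0] ((n : Int)) := by
      rw [PySem.List.pySetD_of_nonneg _ _ (by norm_num), PySem.List.pyRepeat_singleton]
      simp [List.replicate_succ, List.set]
    rw [hB]
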